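-- pv_equiv track=rewrite | github.com/Scottcjn/Rustchain | ergo_token_issuance.py | _select_boxes
-- ===== SOURCE A (Python) =====
-- from typing import Dict, List, Optional, Tuple
--
-- def _select_boxes(boxes: List[Dict], min_value: int) -> List[Dict]:
--     """Select boxes with sufficient value"""
--     selected = []
--     total = 0
--
--     for box in sorted(boxes, key=lambda x: int(x["value"]), reverse=True):
--         selected.append(box)
--         total += int(box["value"])
--         if total >= min_value:
--             break
--
--     if total < min_value:
--         raise ValueError(f"Insufficient funds. Need {min_value}, have {total}")
--
--     return selected
-- ===== SOURCE B (Python) =====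
-- def _take_enough(rest, need):
--     """Shortest prefix of rest covering need, or None if rest cannot cover it."""
--     if not rest:
--         return [] if need <= 0 else None
--     head = rest[0]
--     v = int(head["value"])
--     if v >= need:
--         return [head]
--     sub = _take_enough(rest[1:], need - v)
--     return None if sub is None else [head] + sub
--
-- def _select_boxes(boxes, min_value):
--     srt = sorted(boxes, key=lambda x: int(x["value"]), reverse=True)
--     picked = _take_enough(srt, min_value)
--     if picked is None:
--         total = sum(int(b["value"]) for b in srt)
--         raise ValueError(f"Insufficient funds. Need {min_value}, have {total}")
--     return picked
-- ===== Notes on version B (the rewrite author's own statement) =====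
-- stated objective: alternative
-- what changed: Replaces the imperative accumulate-and-break loop over the sorted list by a recursive helper that threads the REMAINING amount still needed downward and builds the selected prefix front-to-back, returning None on shortfall; the caller raises the identical message.
import Mathlib
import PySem

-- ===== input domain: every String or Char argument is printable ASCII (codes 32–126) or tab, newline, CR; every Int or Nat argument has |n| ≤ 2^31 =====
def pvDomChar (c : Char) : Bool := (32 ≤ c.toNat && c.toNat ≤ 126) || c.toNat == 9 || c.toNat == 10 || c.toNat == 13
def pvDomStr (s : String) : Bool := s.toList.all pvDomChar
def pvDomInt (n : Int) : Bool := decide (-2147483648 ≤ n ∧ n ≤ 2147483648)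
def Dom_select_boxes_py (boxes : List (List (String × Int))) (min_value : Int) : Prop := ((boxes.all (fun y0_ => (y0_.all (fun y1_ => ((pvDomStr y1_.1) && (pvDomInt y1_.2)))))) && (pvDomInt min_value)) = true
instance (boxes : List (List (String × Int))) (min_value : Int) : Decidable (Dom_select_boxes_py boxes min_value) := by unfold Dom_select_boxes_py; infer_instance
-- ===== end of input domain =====

-- B replaces A's accumulate-and-break loop by a recursive helper threading the remaining
-- needed amount and building the selected prefix front-to-back (alternative decomposition).


-- ===== PORT A =====
-- int(box["value"]) : lookup in the dict (assoc list; dict(...) keeps the LAST binding,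
-- as PySem.Dict.ofList does); the default 0 is never used under Pre_ (key present).
def pvVal (box : List (String × Int)) : Int := (PySem.Dict.ofList box).getD "value" 0

-- the for-loop with break: state (selected, total); break when total >= min_value
def pvSelLoop (min_value : Int) : List (List (String × Int)) → List (List (String × Int)) → Int → (List (List (String × Int)) × Int)
  | [], selected, total => (selected, total)
  | box :: rest, selected, total =>
      let selected' := selected ++ [box]
      let total' := total + pvVal box
      if min_value ≤ total' then (selected', total') else pvSelLoop min_value rest selected' total'

def select_boxes_py (boxes : List (List (String × Int))) (min_value : Int) : List (List (String × Int)) :=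
  let r := pvSelLoop min_value (PySem.List.sorted boxes pvVal true) [] 0
  if r.2 < min_value then [] else r.1   -- the 'raise ValueError' branch ports to []; Pre_ excludes it

-- ===== PORT B =====
def pvTakeEnough : List (List (String × Int)) → Int → Option (List (List (String × Int)))
  | [], need => if need ≤ 0 then some [] else none
  | head :: tail, need =>
      let v := pvVal head
      if need ≤ v then some [head]
      else match pvTakeEnough tail (need - v) with
        | none => none
        | some sub => some (head :: sub)

def select_boxes_py_alt (boxes : List (List (String × Int))) (min_value : Int) : List (List (String × Int)) :=
  match pvTakeEnough (PySem.List.sorted boxes pvVal true) min_value with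
  | none => []   -- the 'raise ValueError' branch ports to []; Pre_ excludes it
  | some picked => picked

-- ===== PRECONDITION & SPEC =====
-- Pre_: exactly the inputs where A returns (no KeyError, no ValueError): every box has a
-- "value" key, and the best nonempty prefix sum of the descending-sorted values reaches
-- min_value (= sum of the positive values if the max is positive, else the max value);
-- an empty list needs min_value ≤ 0.
def Pre_select_boxes_py (boxes : List (List (String × Int))) (min_value : Int) : Prop :=
  (∀ b ∈ boxes, (PySem.Dict.ofList b).contains "value" = true) ∧
  (let vals := boxes.map pvVal
   let mx := (vals.max?).getD 0
   let sp := (vals.filter (fun v => 0 < v)).sum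
   if boxes = [] then min_value ≤ 0 else min_value ≤ (if 0 < mx then sp else mx))
instance (boxes : List (List (String × Int))) (min_value : Int) : Decidable (Pre_select_boxes_py boxes min_value) := by unfold Pre_select_boxes_py; infer_instance

def pvWitness_select_boxes_py : (List (List (String × Int))) × Int := ([[("value", 5)], [("value", 2)]], 6)

def Spec_select_boxes_py (boxes : List (List (String × Int))) (min_value : Int) (out : List (List (String × Int))) : Prop := out = select_boxes_py_alt boxes min_value
instance (boxes : List (List (String × Int))) (min_value : Int) (out : List (List (String × Int))) : Decidable (Spec_select_boxes_py boxes min_value out) := by unfold Spec_select_boxes_py; infer_instance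

-- ===== CLAIM (what is proved, stated in full; the proofs are below) =====
def Claim_equal_select_boxes_py : Prop := ∀ (boxes : List (List (String × Int))) (min_value : Int), Dom_select_boxes_py boxes min_value → Pre_select_boxes_py boxes min_value → Spec_select_boxes_py boxes min_value (select_boxes_py boxes min_value)

-- ===== LEMMAS AND PROOFS =====

-- The two traversals agree for EVERY list and every accumulated state:
-- A's loop carries (selected, total); B's recursion carries need = min_value - total.
lemma pvLoop_eq_take (m : Int) (l : List (List (String × Int))) :
    ∀ (sel : List (List (String × Int))) (t : Int),
      (if (pvSelLoop m l sel t).2 < m then [] else (pvSelLoop m l sel t).1)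
      = (match pvTakeEnough l (m - t) with
         | none => ([] : List (List (String × Int)))
         | some sub => sel ++ sub) := by
  induction l with
  | nil =>
      intro sel t
      simp only [pvSelLoop, pvTakeEnough]
      by_cases h : m - t ≤ 0
      · simp [h]
        intro hlt; omega
      · have ht : t < m := by omega
        simp [h, ht]
  | cons box rest ih =>
      intro sel t
      simp only [pvSelLoop, pvTakeEnough]
      by_cases h : m ≤ t + pvVal box
      · have h' : m - t ≤ pvVal box := by omega
        simp [h, h']
      · have h' : ¬ (m - t ≤ pvVal box) := by omega
        simp only [h, h', if_false]
        have := ih (sel ++ [box]) (t + pvVal box)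
        have harg : m - (t + pvVal box) = m - t - pvVal box := by ring
        rw [harg] at this
        rw [this]
        cases pvTakeEnough rest (m - t - pvVal box) with
        | none => simp
        | some sub => simp

-- ===== VERDICT (by name: the statement is the Claim_ definition above) =====
theorem select_boxes_py_spec : Claim_equal_select_boxes_py := by
  intro boxes min_value _ _
  unfold Spec_select_boxes_py select_boxes_py select_boxes_py_alt
  have := pvLoop_eq_take min_value (PySem.List.sorted boxes pvVal true) [] 0
  rw [sub_zero] at this
  simp only at this ⊢
  rw [this]
  cases pvTakeEnough (PySem.List.sorted boxes pvVal true) min_value with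
  | none => simp
  | some picked => simp
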